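-- pv_equiv track=rewrite | github.com/ChiragNSundar/VibeLyrics | app/analysis/multi_rhyme.py | get_rhyme_family
-- ===== SOURCE A (Python) =====
-- from typing import List, Dict, Tuple, Optional
--
-- MULTI_RHYME_FAMILIES = {
--     "elevation": ["celebration", "dedication", "devastation", "meditation", "revelation",
--                   "operation", "separation", "generation", "conversation", "destination"],
--     "situation": ["education", "motivation", "reputation", "imagination", "foundation",
--                   "concentration", "population", "information", "fascination", "domination"],
--     "legendary": ["cemetery", "beneficiary", "extraordinary", "missionary", "visionary",
--                   "stationary", "sanctuary", "mercenary", "solitary", "obituary"],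
--     "incredible": ["edible", "responsible", "accessible", "flexible", "terrible",
--                    "horrible", "impossible", "invisible", "invincible", "susceptible"],
--     "opportunity": ["community", "immunity", "unity", "impunity", "continuity"],
--     "mentality": ["reality", "brutality", "fatality", "vitality", "immortality",
--                   "originality", "hospitality", "personality", "nationality", "morality"]
-- }
--
-- def get_rhyme_family(word: str) -> List[str]:
--     """Get pre-built rhyme family for common multi-syllable endings"""
--     word_lower = word.lower()
--
--     # Check if word is in any family
--     for key_word, family in MULTI_RHYME_FAMILIES.items():
--         if word_lower == key_word or word_lower in family:
--             # Return family excluding the query word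
--             return [w for w in [key_word] + family if w != word_lower]
--
--     # Check for common endings
--     for ending in ["ation", "ity", "ary", "ible", "able"]:
--         if word_lower.endswith(ending):
--             # Find words with same ending from families
--             matches = []
--             for key_word, family in MULTI_RHYME_FAMILIES.items():
--                 if key_word.endswith(ending):
--                     matches.extend([key_word] + family)
--             return [w for w in matches if w != word_lower][:15]
--
--     return []
-- ===== SOURCE B (Python) =====
-- # B: precomputed index tables (word -> full family, ending -> concatenated matches)
-- # replace A's repeated scans over MULTI_RHYME_FAMILIES with single dict lookups.
-- MULTI_RHYME_FAMILIES = {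
--     "elevation": ["celebration", "dedication", "devastation", "meditation", "revelation",
--                   "operation", "separation", "generation", "conversation", "destination"],
--     "situation": ["education", "motivation", "reputation", "imagination", "foundation",
--                   "concentration", "population", "information", "fascination", "domination"],
--     "legendary": ["cemetery", "beneficiary", "extraordinary", "missionary", "visionary",
--                   "stationary", "sanctuary", "mercenary", "solitary", "obituary"],
--     "incredible": ["edible", "responsible", "accessible", "flexible", "terrible",
--                    "horrible", "impossible", "invisible", "invincible", "susceptible"],
--     "opportunity": ["community", "immunity", "unity", "impunity", "continuity"],
--     "mentality": ["reality", "brutality", "fatality", "vitality", "immortality",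
--                   "originality", "hospitality", "personality", "nationality", "morality"]
-- }
--
-- _ENDINGS = ["ation", "ity", "ary", "ible", "able"]
--
-- _WORD_INDEX = {}
-- for _key, _fam in MULTI_RHYME_FAMILIES.items():
--     _full = [_key] + _fam
--     for _w in _full:
--         _WORD_INDEX.setdefault(_w, _full)   # first family wins, like A's scan
--
-- _ENDING_INDEX = {
--     e: [w for key, fam in MULTI_RHYME_FAMILIES.items() if key.endswith(e)
--         for w in [key] + fam]
--     for e in _ENDINGS
-- }
--
-- def get_rhyme_family(word):
--     word_lower = word.lower()
--     full = _WORD_INDEX.get(word_lower)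
--     if full is not None:
--         return [w for w in full if w != word_lower]
--     for ending in _ENDINGS:
--         if word_lower.endswith(ending):
--             return [w for w in _ENDING_INDEX[ending] if w != word_lower][:15]
--     return []
-- ===== Notes on version B (the rewrite author's own statement) =====
-- stated objective: alternative
-- what changed: Replaces A's per-call scans over MULTI_RHYME_FAMILIES with two module-level index tables built once (word -> full family with first-family precedence via setdefault, ending -> concatenated matching families), so each call is a dict lookup plus a filter.
import Mathlib
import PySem

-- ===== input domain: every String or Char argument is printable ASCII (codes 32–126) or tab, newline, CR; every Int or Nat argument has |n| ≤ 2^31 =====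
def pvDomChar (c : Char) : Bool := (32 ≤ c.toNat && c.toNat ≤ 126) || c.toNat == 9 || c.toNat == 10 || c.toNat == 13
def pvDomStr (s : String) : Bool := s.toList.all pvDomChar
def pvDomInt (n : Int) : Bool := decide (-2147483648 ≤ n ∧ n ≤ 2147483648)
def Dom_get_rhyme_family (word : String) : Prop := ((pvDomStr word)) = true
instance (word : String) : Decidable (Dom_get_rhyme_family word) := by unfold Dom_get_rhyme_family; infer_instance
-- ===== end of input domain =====

-- B replaces A's per-call scans with two precomputed index tables (alternative data structure; same results).

-- ===== PORT A =====
def pvFamilies : List (String × List String) :=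
  [("elevation", ["celebration", "dedication", "devastation", "meditation", "revelation",
                  "operation", "separation", "generation", "conversation", "destination"]),
   ("situation", ["education", "motivation", "reputation", "imagination", "foundation",
                  "concentration", "population", "information", "fascination", "domination"]),
   ("legendary", ["cemetery", "beneficiary", "extraordinary", "missionary", "visionary",
                  "stationary", "sanctuary", "mercenary", "solitary", "obituary"]),
   ("incredible", ["edible", "responsible", "accessible", "flexible", "terrible",
                   "horrible", "impossible", "invisible", "invincible", "susceptible"]),
   ("opportunity", ["community", "immunity", "unity", "impunity", "continuity"]),
   ("mentality", ["reality", "brutality", "fatality", "vitality", "immortality",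
                  "originality", "hospitality", "personality", "nationality", "morality"])]

-- A's first loop: first family whose key equals or whose members contain word_lower (early return)
def pvFamLoop (wl : String) : List (String × List String) → Option (List String)
  | [] => none
  | kf :: rest =>
      if wl = kf.1 ∨ wl ∈ kf.2 then some ((kf.1 :: kf.2).filter (fun w => w != wl))
      else pvFamLoop wl rest

-- A's inner matches-building loop for one ending
def pvMatchesFor (e : String) : List String :=
  pvFamilies.foldl (fun acc kf => if PySem.Str.endswith kf.1 e then acc ++ kf.1 :: kf.2 else acc) []

-- A's second loop over the endings (early return)
def pvEndLoopA (wl : String) : List String → Option (List String)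
  | [] => none
  | e :: rest =>
      if PySem.Str.endswith wl e then
        some (((pvMatchesFor e).filter (fun w => w != wl)).take 15)
      else pvEndLoopA wl rest

def get_rhyme_family (word : String) : List String :=
  let wl := PySem.Str.lower word
  match pvFamLoop wl pvFamilies with
  | some r => r
  | none => (pvEndLoopA wl ["ation", "ity", "ary", "ible", "able"]).getD []

-- ===== PORT B =====
-- module-level word -> full-family index (setdefault: first family wins)
def pvWordIndex : PySem.Dict String (List String) :=
  pvFamilies.foldl
    (fun d kf => (kf.1 :: kf.2).foldl (fun d w => d.setdefault w (kf.1 :: kf.2)) d)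
    PySem.Dict.empty

def pvEndings : List String := ["ation", "ity", "ary", "ible", "able"]

-- module-level ending -> concatenated matching families index
def pvEndingIndex : PySem.Dict String (List String) :=
  pvEndings.foldl
    (fun d e => d.insert e
      (pvFamilies.foldl (fun acc kf => if PySem.Str.endswith kf.1 e then acc ++ kf.1 :: kf.2 else acc) []))
    PySem.Dict.empty

-- B's ending loop; _ENDING_INDEX[ending] always hits (ending ∈ pvEndings), so getD is exact
def pvEndLoopB (wl : String) : List String → Option (List String)
  | [] => none
  | e :: rest =>
      if PySem.Str.endswith wl e then
        some (((pvEndingIndex.getD e []).filter (fun w => w != wl)).take 15)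
      else pvEndLoopB wl rest

def get_rhyme_family_alt (word : String) : List String :=
  let wl := PySem.Str.lower word
  match pvWordIndex.get? wl with
  | some full => full.filter (fun w => w != wl)
  | none => (pvEndLoopB wl pvEndings).getD []

-- ===== PRECONDITION & SPEC =====
def Spec_get_rhyme_family (word : String) (out : List String) : Prop := out = get_rhyme_family_alt word
instance (word : String) (out : List String) : Decidable (Spec_get_rhyme_family word out) := by unfold Spec_get_rhyme_family; infer_instance

-- ===== CLAIM (what is proved, stated in full; the proofs are below) =====
def Claim_equal_get_rhyme_family : Prop := ∀ (word : String), Dom_get_rhyme_family word → Spec_get_rhyme_family word (get_rhyme_family word)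

-- ===== LEMMAS AND PROOFS =====

-- the first family (in order) containing wl, as a scan — the common spec of A's loop and B's index
def pvFamScan (wl : String) : List (String × List String) → Option (List String)
  | [] => none
  | kf :: rest => if wl ∈ kf.1 :: kf.2 then some (kf.1 :: kf.2) else pvFamScan wl rest

lemma sd_fold_get? (full ws : List String) (d : PySem.Dict String (List String)) (wl : String) :
    ((ws.foldl (fun d w => d.setdefault w full) d).get? wl)
      = (d.get? wl).or (if wl ∈ ws then some full else none) := by
  induction ws generalizing d with
  | nil => simp
  | cons w ws ih =>
    simp only [List.foldl_cons, ih]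
    by_cases h : wl = w
    · subst h
      rw [PySem.Dict.get?_setdefault_self]
      cases d.get? wl <;> simp
    · simp [PySem.Dict.get?_setdefault_of_ne, List.mem_cons, h]

lemma idx_fold_get? (fams : List (String × List String)) (d : PySem.Dict String (List String)) (wl : String) :
    ((fams.foldl (fun d kf => (kf.1 :: kf.2).foldl (fun d w => d.setdefault w (kf.1 :: kf.2)) d) d).get? wl)
      = (d.get? wl).or (pvFamScan wl fams) := by
  induction fams generalizing d with
  | nil => simp [pvFamScan]
  | cons kf fams ih =>
    rw [List.foldl_cons, ih, sd_fold_get?]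
    simp only [pvFamScan]
    by_cases h : wl ∈ kf.1 :: kf.2
    · simp [h]
    · simp [h]

lemma wordIndex_get? (wl : String) : pvWordIndex.get? wl = pvFamScan wl pvFamilies := by
  unfold pvWordIndex
  rw [idx_fold_get?]
  simp

lemma famLoop_eq (wl : String) (fams : List (String × List String)) :
    pvFamLoop wl fams = (pvFamScan wl fams).map (fun full => full.filter (fun w => w != wl)) := by
  induction fams with
  | nil => rfl
  | cons kf fams ih =>
    simp only [pvFamLoop, pvFamScan]
    by_cases h : wl = kf.1 ∨ wl ∈ kf.2
    · have h' : wl ∈ kf.1 :: kf.2 := by simpa [List.mem_cons] using h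
      simp [h, h']
    · have h' : wl ∉ kf.1 :: kf.2 := by simpa [List.mem_cons] using h
      simp [h, h', ih]

lemma endLoop_eq (wl : String) (es : List String)
    (h : ∀ e ∈ es, pvMatchesFor e = pvEndingIndex.getD e []) :
    pvEndLoopA wl es = pvEndLoopB wl es := by
  induction es with
  | nil => rfl
  | cons e es ih =>
    simp only [pvEndLoopA, pvEndLoopB]
    rw [← h e (by simp)]
    split_ifs with hc
    · rfl
    · exact ih (fun e' he' => h e' (List.mem_cons_of_mem _ he'))

set_option maxRecDepth 10000 in
lemma endingIndex_hits : ∀ e ∈ pvEndings, pvMatchesFor e = pvEndingIndex.getD e [] := by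
  intro e he
  simp only [pvEndings, List.mem_cons, List.not_mem_nil, or_false] at he
  rcases he with rfl | rfl | rfl | rfl | rfl <;> rfl

-- ===== VERDICT (by name: the statement is the Claim_ definition above) =====
set_option maxRecDepth 10000 in
theorem get_rhyme_family_spec : Claim_equal_get_rhyme_family := by
  intro word _
  unfold Spec_get_rhyme_family
  show (match pvFamLoop (PySem.Str.lower word) pvFamilies with
        | some r => r
        | none => (pvEndLoopA (PySem.Str.lower word) pvEndings).getD [])
      = (match pvWordIndex.get? (PySem.Str.lower word) with
        | some full => List.filter (fun w => w != PySem.Str.lower word) full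
        | none => (pvEndLoopB (PySem.Str.lower word) pvEndings).getD [])
  rw [famLoop_eq, wordIndex_get?, endLoop_eq _ _ endingIndex_hits]
  cases pvFamScan (PySem.Str.lower word) pvFamilies <;> rfl
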